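-- pv_equiv track=rewrite | github.com/vosslab/biology-problems | molecular_biology-problems/enhancer_gene_expression.py | is_enhancer_set_activated
-- ===== SOURCE A (Python) =====
-- import copy
--
-- def is_enhancer_set_activated(enhancer_set, activator_set):
--     unbound_enhancers = copy.copy(enhancer_set)
--     for a_color in activator_set:
--         try:
--             unbound_enhancers.remove(a_color)
--         except ValueError:
--             pass
--     num_unbound_enhancers = len(unbound_enhancers)
--     return num_unbound_enhancers
-- ===== SOURCE B (Python) =====
-- def is_enhancer_set_activated(enhancer_set, activator_set):
--     es = sorted(enhancer_set)
--     ab = sorted(activator_set)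
--     i = 0
--     j = 0
--     matches = 0
--     while i < len(es) and j < len(ab):
--         if es[i] == ab[j]:
--             matches += 1
--             i += 1
--             j += 1
--         elif es[i] < ab[j]:
--             i += 1
--         else:
--             j += 1
--     return len(enhancer_set) - matches
-- ===== Notes on version B (the rewrite author's own statement) =====
-- stated objective: faster
-- what changed: Replaces A's per-activator list.remove scans over a copied enhancer list with sorting copies of both lists and a single two-pointer merge pass that counts multiset matches, returning len(enhancer_set) - matches.
import Mathlib
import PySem

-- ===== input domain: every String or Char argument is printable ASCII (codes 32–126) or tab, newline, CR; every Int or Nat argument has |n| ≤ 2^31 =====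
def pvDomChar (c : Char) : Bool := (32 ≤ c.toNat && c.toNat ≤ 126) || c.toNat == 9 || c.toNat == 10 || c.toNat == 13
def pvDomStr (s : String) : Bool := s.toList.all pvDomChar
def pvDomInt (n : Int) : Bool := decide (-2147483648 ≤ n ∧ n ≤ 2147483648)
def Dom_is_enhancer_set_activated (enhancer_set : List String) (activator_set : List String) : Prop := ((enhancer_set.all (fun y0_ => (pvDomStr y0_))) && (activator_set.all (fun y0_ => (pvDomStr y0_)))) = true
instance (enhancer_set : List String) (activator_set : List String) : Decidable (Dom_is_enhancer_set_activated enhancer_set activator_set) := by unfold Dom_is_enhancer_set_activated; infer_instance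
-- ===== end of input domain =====

-- B sorts copies of both lists and counts multiset matches in one two-pointer merge pass (faster than A's per-activator remove scans).

-- ===== PORT A =====
def is_enhancer_set_activated (enhancer_set : List String) (activator_set : List String) : Int :=
  let unbound_enhancers := activator_set.foldl
    (fun u a_color =>
      match PySem.List.remove? u a_color with
      | some u' => u'        -- remove succeeded
      | none => u)           -- ValueError: pass
    enhancer_set
  (unbound_enhancers.length : Int)

-- ===== PORT B =====
-- the while loop of Source B as structural recursion over the two sorted lists
def pvMergeMatches : List String → List String → Int
  | [], _ => 0
  | _ :: _, [] => 0
  | x :: xs, y :: ys =>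
    if x = y then 1 + pvMergeMatches xs ys
    else if x < y then pvMergeMatches xs (y :: ys)
    else pvMergeMatches (x :: xs) ys
termination_by a b => a.length + b.length

def is_enhancer_set_activated_alt (enhancer_set : List String) (activator_set : List String) : Int :=
  let es := PySem.List.sorted enhancer_set (fun s => s) false
  let ab := PySem.List.sorted activator_set (fun s => s) false
  (enhancer_set.length : Int) - pvMergeMatches es ab

-- ===== PRECONDITION & SPEC =====
def Spec_is_enhancer_set_activated (enhancer_set : List String) (activator_set : List String) (out : Int) : Prop := out = is_enhancer_set_activated_alt enhancer_set activator_set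
instance (enhancer_set : List String) (activator_set : List String) (out : Int) : Decidable (Spec_is_enhancer_set_activated enhancer_set activator_set out) := by unfold Spec_is_enhancer_set_activated; infer_instance

-- ===== CLAIM =====
def Claim_equal_is_enhancer_set_activated : Prop := ∀ (enhancer_set : List String) (activator_set : List String), Dom_is_enhancer_set_activated enhancer_set activator_set → Spec_is_enhancer_set_activated enhancer_set activator_set (is_enhancer_set_activated enhancer_set activator_set)

-- ===== LEMMAS AND PROOFS =====

-- list.remove raises (and A passes) exactly when the element is absent
theorem pv_remove?_none (xs : List String) (v : String) (h : v ∉ xs) :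
    PySem.List.remove? xs v = none := by
  induction xs with
  | nil => simp [PySem.List.remove?]
  | cons x xs ih =>
    have hne : x ≠ v := fun e => h (e ▸ List.mem_cons_self)
    rw [PySem.List.remove?_cons_of_ne xs hne, ih (fun hm => h (List.mem_cons_of_mem _ hm))]
    rfl

-- A's loop body is List.erase (remove when present, identity when absent)
theorem pv_A_eq_diff (E A : List String) :
    is_enhancer_set_activated E A = ((E.diff A).length : Int) := by
  unfold is_enhancer_set_activated
  have : ∀ (A : List String) (u : List String),
      A.foldl (fun u a =>
        match PySem.List.remove? u a with
        | some u' => u'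
        | none => u) u = A.foldl List.erase u := by
    intro A
    induction A with
    | nil => intro u; rfl
    | cons a rest ih =>
      intro u
      by_cases hm : a ∈ u
      · simp only [List.foldl_cons, PySem.List.remove?_eq_some_erase u a hm, ih]
      · simp only [List.foldl_cons, pv_remove?_none u a hm, ih,
          List.erase_of_not_mem hm]
  simp only [this, ← List.diff_eq_foldl]

-- a multiset identity: (s - t) + (s ∩ t) = s
theorem pv_sub_add_inter (s t : Multiset String) : (s - t) + (s ∩ t) = s := by
  ext k; simp [Multiset.count_sub, Multiset.count_inter]

theorem pv_inter_cons_left_of_not_mem (x : String) (s t : Multiset String) (h : x ∉ t) :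
    (x ::ₘ s) ∩ t = s ∩ t := by
  ext k
  simp only [Multiset.count_inter, Multiset.count_cons]
  by_cases hk : k = x
  · subst hk
    have : Multiset.count k t = 0 := Multiset.count_eq_zero.mpr h
    simp [this]
  · simp [hk]

theorem pv_inter_cons_right_of_not_mem (y : String) (s t : Multiset String) (h : y ∉ s) :
    s ∩ (y ::ₘ t) = s ∩ t := by
  ext k
  simp only [Multiset.count_inter, Multiset.count_cons]
  by_cases hk : k = y
  · subst hk
    have : Multiset.count k s = 0 := Multiset.count_eq_zero.mpr h
    simp [this]
  · simp [hk]

theorem pv_inter_cons_cons (a : String) (s t : Multiset String) :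
    (a ::ₘ s) ∩ (a ::ₘ t) = a ::ₘ (s ∩ t) := by
  ext k
  simp only [Multiset.count_inter, Multiset.count_cons]
  split_ifs <;> omega

-- on sorted lists, the merge pass counts the multiset intersection
theorem pv_merge_eq_inter : ∀ (xs ys : List String),
    xs.Pairwise (· ≤ ·) → ys.Pairwise (· ≤ ·) →
    pvMergeMatches xs ys = (((xs : Multiset String) ∩ (ys : Multiset String)).card : Int) := by
  intro xs ys
  induction hn : xs.length + ys.length using Nat.strong_induction_on generalizing xs ys with
  | _ n ih =>
    intro hx hy
    match xs, ys with
    | [], ys => simp [pvMergeMatches]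
    | x :: xs, [] => simp [pvMergeMatches]
    | x :: xs, y :: ys =>
      rw [pvMergeMatches]
      by_cases hxy : x = y
      · subst hxy
        rw [if_pos rfl]
        have := ih (xs.length + ys.length) (by subst hn; simp; omega) xs ys rfl
          hx.of_cons hy.of_cons
        rw [this]
        simp only [← Multiset.cons_coe, pv_inter_cons_cons, Multiset.card_cons]
        push_cast; ring
      · rw [if_neg hxy]
        by_cases hlt : x < y
        · rw [if_pos hlt]
          have hnm : x ∉ y :: ys := by
            intro hm
            rcases List.mem_cons.mp hm with h | h
            · exact absurd h hxy
            · exact absurd (lt_of_lt_of_le hlt ((List.pairwise_cons.mp hy).1 _ h)) (lt_irrefl x)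
          have := ih (xs.length + (y :: ys).length) (by subst hn; simp) xs (y :: ys) rfl
            hx.of_cons hy
          rw [this]
          have hrw : ((x :: xs : List String) : Multiset String) ∩ ((y :: ys : List String) : Multiset String)
              = (xs : Multiset String) ∩ ((y :: ys : List String) : Multiset String) :=
            pv_inter_cons_left_of_not_mem x (xs : Multiset String) ((y :: ys : List String) : Multiset String) (by simpa using hnm)
          exact congrArg (fun m => ((Multiset.card m : Nat) : Int)) hrw.symm
        · rw [if_neg hlt]
          have hylt : y < x := lt_of_le_of_ne (le_of_not_gt hlt) (Ne.symm hxy)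
          have hnm : y ∉ x :: xs := by
            intro hm
            rcases List.mem_cons.mp hm with h | h
            · exact absurd h.symm hxy
            · exact absurd (lt_of_lt_of_le hylt ((List.pairwise_cons.mp hx).1 _ h)) (lt_irrefl y)
          have := ih ((x :: xs).length + ys.length) (by subst hn; simp) (x :: xs) ys rfl
            hx hy.of_cons
          rw [this]
          have hrw : ((x :: xs : List String) : Multiset String) ∩ ((y :: ys : List String) : Multiset String)
              = ((x :: xs : List String) : Multiset String) ∩ (ys : Multiset String) :=
            pv_inter_cons_right_of_not_mem y ((x :: xs : List String) : Multiset String) (ys : Multiset String) (by simpa using hnm)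
          exact congrArg (fun m => ((Multiset.card m : Nat) : Int)) hrw.symm

-- ===== VERDICT =====
theorem is_enhancer_set_activated_spec : Claim_equal_is_enhancer_set_activated := by
  intro E A _
  unfold Spec_is_enhancer_set_activated is_enhancer_set_activated_alt
  rw [pv_A_eq_diff]
  show ((E.diff A).length : Int) = (E.length : Int)
    - pvMergeMatches (PySem.List.sorted E (fun s => s) false) (PySem.List.sorted A (fun s => s) false)
  have hperm1 : (PySem.List.sorted E (fun s => s) false).Perm E := PySem.List.sorted_perm ..
  have hperm2 : (PySem.List.sorted A (fun s => s) false).Perm A := PySem.List.sorted_perm ..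
  have hpw1 : (PySem.List.sorted E (fun s => s) false).Pairwise (· ≤ ·) :=
    PySem.List.sorted_pairwise ..
  have hpw2 : (PySem.List.sorted A (fun s => s) false).Pairwise (· ≤ ·) :=
    PySem.List.sorted_pairwise ..
  rw [pv_merge_eq_inter _ _ hpw1 hpw2,
    Multiset.coe_eq_coe.mpr hperm1, Multiset.coe_eq_coe.mpr hperm2]
  have hdiff : ((E.diff A : List String) : Multiset String)
      = (E : Multiset String) - (A : Multiset String) := Multiset.coe_sub E A
  have hcard := congrArg Multiset.card (pv_sub_add_inter (E : Multiset String) (A : Multiset String))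
  rw [Multiset.card_add] at hcard
  have h1 : (E.diff A).length = Multiset.card ((E : Multiset String) - (A : Multiset String)) := by
    rw [← hdiff]; simp
  have h2 : E.length = Multiset.card (E : Multiset String) := by simp
  omega
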